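-- pv_equiv track=rewrite | github.com/PrediktorAS/opcua-tools | opcua_tools/ua_graph.py | _get_namespace_list
-- ===== SOURCE A (Python) =====
-- def _get_namespace_list(namespace_dict: dict) -> list:
--     namespace_list = []
--     max_namespace = max(namespace_dict.keys()) + 1
--     for namespace_index in range(0, max_namespace):
--         if namespace_index in namespace_dict.keys():
--             namespace_list.append(namespace_dict[namespace_index])
--         else:
--             namespace_list.append("None")
--     return namespace_list
-- ===== SOURCE B (Python) =====
-- def _get_namespace_list(namespace_dict: dict) -> list:
--     result = []
--     for index, name in sorted(namespace_dict.items(), key=lambda item: item[0]):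
--         if len(result) <= index:
--             result.extend(["None"] * (index - len(result)))
--             result.append(name)
--     return result
-- ===== Notes on version B (the rewrite author's own statement) =====
-- stated objective: alternative
-- what changed: Instead of scanning every index 0..max(keys) and testing dict membership at each one, B sorts the items by key and builds the list in one left-to-right pass, extending with 'None' fillers up to each key's slot.
-- outside the precondition, e.g. on _get_namespace_list({}): A raises ValueError, B returns []
import Mathlib
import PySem

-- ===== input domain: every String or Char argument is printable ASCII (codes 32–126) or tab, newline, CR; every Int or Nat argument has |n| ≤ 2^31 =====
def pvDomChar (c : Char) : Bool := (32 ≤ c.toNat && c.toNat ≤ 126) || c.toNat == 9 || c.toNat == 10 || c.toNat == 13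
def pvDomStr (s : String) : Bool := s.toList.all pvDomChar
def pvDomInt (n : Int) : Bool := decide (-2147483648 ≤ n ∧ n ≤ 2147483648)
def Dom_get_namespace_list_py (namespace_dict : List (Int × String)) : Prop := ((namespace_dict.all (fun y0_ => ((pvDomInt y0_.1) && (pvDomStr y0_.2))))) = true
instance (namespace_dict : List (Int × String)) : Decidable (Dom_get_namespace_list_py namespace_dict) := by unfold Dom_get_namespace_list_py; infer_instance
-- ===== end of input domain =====

-- B replaces A's scan over every index 0..max with membership tests by a single
-- gap-filling pass over the items sorted by key (alternative algorithm).

-- ===== PORT A =====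
def get_namespace_list_py (namespace_dict : List (Int × String)) : List String :=
  -- the Python dict argument is PySem.Dict.ofList namespace_dict (last value wins)
  match PySem.List.max? (PySem.Dict.ofList namespace_dict).keys (fun x => x) with
  | none => []      -- max() of an empty dict raises ValueError; excluded by Pre_
  | some mx =>
    (PySem.List.pyRange 0 (mx + 1) 1).foldl
      (fun acc i =>
        if (PySem.Dict.ofList namespace_dict).contains i then
          acc ++ [(PySem.Dict.ofList namespace_dict).getD i "None"]   -- guarded by the membership test, so d[i] never raises
        else
          acc ++ ["None"]) []

-- ===== PORT B =====
def get_namespace_list_py_alt (namespace_dict : List (Int × String)) : List String :=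
  (PySem.List.sorted (PySem.Dict.ofList namespace_dict).items (fun item => item.1) false).foldl
    (fun result kv =>
      if (result.length : Int) ≤ kv.1 then
        (result ++ PySem.List.pyRepeat ["None"] (kv.1 - result.length)) ++ [kv.2]
      else result) []

-- ===== PRECONDITION & SPEC =====
-- Pre_ excludes only the empty dict, on which A's max() raises ValueError (A returns on
-- every other input, and B matches it there, negative keys included; on the empty dict
-- B itself simply returns []).
def Pre_get_namespace_list_py (namespace_dict : List (Int × String)) : Prop :=
  namespace_dict ≠ []
instance (namespace_dict : List (Int × String)) : Decidable (Pre_get_namespace_list_py namespace_dict) := by unfold Pre_get_namespace_list_py; infer_instance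

def pvWitness_get_namespace_list_py : (List (Int × String)) := [(0, "ns0"), (2, "ns2")]

def Spec_get_namespace_list_py (namespace_dict : List (Int × String)) (out : List String) : Prop := out = get_namespace_list_py_alt namespace_dict
instance (namespace_dict : List (Int × String)) (out : List String) : Decidable (Spec_get_namespace_list_py namespace_dict out) := by unfold Spec_get_namespace_list_py; infer_instance

-- ===== CLAIM (what is proved, stated in full; the proofs are below) =====
def Claim_equal_get_namespace_list_py : Prop := ∀ (namespace_dict : List (Int × String)), Dom_get_namespace_list_py namespace_dict → Pre_get_namespace_list_py namespace_dict → Spec_get_namespace_list_py namespace_dict (get_namespace_list_py namespace_dict)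

-- ===== LEMMAS AND PROOFS =====

-- A's append-loop is a map.
theorem pv_foldl_app {α β : Type} (f : α → β) :
    ∀ (l : List α) (acc : List β),
      l.foldl (fun a i => a ++ [f i]) acc = acc ++ l.map f := by
  intro l
  induction l with
  | nil => intro acc; simp
  | cons x t ih => intro acc; simp [ih]

-- length B produces from a sorted item list: one past its last key, clamped at 0
def pvLenB (s : List (Int × String)) : Int :=
  match s.getLast? with
  | none => 0
  | some kv => max 0 (kv.1 + 1)

theorem pvLenB_nonneg (s : List (Int × String)) : 0 ≤ pvLenB s := by
  unfold pvLenB; cases s.getLast? <;> simp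

-- every key of a strictly key-sorted list lies below pvLenB
theorem pv_key_lt_lenB (t : List (Int × String)) (hpw : t.Pairwise (fun a b => a.1 < b.1)) :
    ∀ x ∈ t, x.1 < pvLenB t := by
  rcases t.eq_nil_or_concat with rfl | ⟨t', p, rfl⟩
  · intro x hx; simp at hx
  · simp only [List.concat_eq_append] at hpw ⊢
    have hlast : (t' ++ [p]).getLast? = some p := List.getLast?_concat
    have hlt : ∀ x ∈ t', x.1 < p.1 := by
      have := (List.pairwise_append.mp hpw).2.2
      intro x hx; exact this x hx p (by simp)
    intro x hx
    rcases List.mem_append.mp hx with hx' | hx'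
    · have := hlt x hx'
      simp only [pvLenB, hlast]; omega
    · have : x = p := by simpa using hx'
      subst this
      simp only [pvLenB, hlast]; omega

-- B's fold over a strictly key-sorted list of dict entries builds A's table
theorem pv_build (d : List (Int × String)) :
    ∀ s : List (Int × String),
      s.Pairwise (fun a b => a.1 < b.1) →
      (∀ kv ∈ s, (PySem.Dict.ofList d).get? kv.1 = some kv.2) →
      (∀ i : Int, 0 ≤ i → (PySem.Dict.ofList d).contains i →
        i ∈ s.map Prod.fst ∨ ∀ kv ∈ s, kv.1 < i) →
      s.foldl (fun result kv =>
          if (result.length : Int) ≤ kv.1 then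
            (result ++ PySem.List.pyRepeat ["None"] (kv.1 - result.length)) ++ [kv.2]
          else result) [] =
        (PySem.List.pyRange 0 (pvLenB s) 1).map
          (fun i => if (PySem.Dict.ofList d).contains i then
            (PySem.Dict.ofList d).getD i "None" else "None") := by
  intro s
  induction s using List.reverseRecOn with
  | nil =>
      intro _ _ _
      rw [show pvLenB [] = 0 from rfl, PySem.List.pyRange_one_eq_nil (by omega)]
      simp
  | append_singleton t kv ih =>
      intro hpw hent hcomp
      set f : Int → String := fun i => if (PySem.Dict.ofList d).contains i then
        (PySem.Dict.ofList d).getD i "None" else "None" with hf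
      have hpwt : t.Pairwise (fun a b => a.1 < b.1) := (List.pairwise_append.mp hpw).1
      have hlt : ∀ x ∈ t, x.1 < kv.1 := by
        have := (List.pairwise_append.mp hpw).2.2
        intro x hx; exact this x hx kv (by simp)
      have hentt : ∀ p ∈ t, (PySem.Dict.ofList d).get? p.1 = some p.2 := by
        intro p hp; exact hent p (by simp [hp])
      have hcompt : ∀ i : Int, 0 ≤ i → (PySem.Dict.ofList d).contains i →
          i ∈ t.map Prod.fst ∨ ∀ p ∈ t, p.1 < i := by
        intro i h0 hc
        rcases hcomp i h0 hc with hm | hall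
        · rcases List.mem_map.mp hm with ⟨x, hx, he⟩
          rcases List.mem_append.mp hx with hx' | hx'
          · exact Or.inl (he ▸ List.mem_map_of_mem hx')
          · have : x = kv := by simpa using hx'
            subst this; subst he
            exact Or.inr hlt
        · exact Or.inr (fun p hp => hall p (by simp [hp]))
      have hR := ih hpwt hentt hcompt
      rw [List.foldl_append, hR, List.foldl_cons, List.foldl_nil]
      have hlast : (t ++ [kv]).getLast? = some kv := List.getLast?_concat
      have hlenB : pvLenB (t ++ [kv]) = max 0 (kv.1 + 1) := by simp only [pvLenB, hlast]
      set L := pvLenB t with hL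
      have hL0 : 0 ≤ L := pvLenB_nonneg t
      have hRlen : ((PySem.List.pyRange 0 L 1).map f).length = L.toNat := by
        rw [List.length_map, PySem.List.length_pyRange_one]; omega
      have hLle : ∀ x ∈ t, x.1 < L := pv_key_lt_lenB t hpwt
      by_cases hpos : 0 ≤ kv.1
      · -- append the gap and the value
        have hLk : L ≤ kv.1 := by
          rcases t.eq_nil_or_concat with rfl | ⟨t', p, rfl⟩
          · simp only [pvLenB, List.getLast?_nil] at hL; omega
          · simp only [List.concat_eq_append] at hlt hL
            have := hlt p (by simp)
            simp only [pvLenB, List.getLast?_concat] at hL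
            omega
        rw [if_pos (by rw [hRlen]; omega)]
        rw [hlenB, show max 0 (kv.1 + 1) = kv.1 + 1 by omega]
        rw [PySem.List.pyRange_one_append 0 L (kv.1 + 1) hL0 (by omega),
            PySem.List.pyRange_one_append L kv.1 (kv.1 + 1) hLk (by omega),
            PySem.List.pyRange_one_singleton]
        rw [List.map_append, List.map_append, List.append_assoc]
        congr 1
        congr 1
        · -- the gap indices carry no key: the map is a run of "None"
          have hnone : ∀ i ∈ PySem.List.pyRange L kv.1 1, f i = "None" := by
            intro i hi
            have hib := PySem.List.mem_pyRange_one.mp hi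
            have hnc : ¬ (PySem.Dict.ofList d).contains i := by
              intro hc
              rcases hcomp i (by omega) hc with hm | hall
              · rcases List.mem_map.mp hm with ⟨x, hx, he⟩
                rcases List.mem_append.mp hx with hx' | hx'
                · have := hLle x hx'; omega
                · have : x = kv := by simpa using hx'
                  subst this; omega
              · have := hall kv (by simp); omega
            simp [hf, hnc]
          rw [List.map_congr_left hnone, List.map_const',
            PySem.List.length_pyRange_one, PySem.List.pyRepeat_singleton, hRlen]
          congr 1
          omega
        · have hck : (PySem.Dict.ofList d).contains kv.1 := by
            rw [PySem.Dict.contains_eq_isSome_get?, hent kv (by simp)]; rfl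
          have hgd : (PySem.Dict.ofList d).getD kv.1 "None" = kv.2 := by
            rw [PySem.Dict.getD_eq_get?_getD, hent kv (by simp)]; rfl
          simp [hf, hck, hgd]
      · -- negative key: skipped, and pvLenB stays 0
        have hLz : L = 0 := by
          rcases t.eq_nil_or_concat with rfl | ⟨t', p, rfl⟩
          · simp only [pvLenB, List.getLast?_nil] at hL; omega
          · simp only [List.concat_eq_append] at hlt hL
            have := hlt p (by simp)
            simp only [pvLenB, List.getLast?_concat] at hL
            omega
        rw [if_neg (by rw [hRlen]; omega)]
        rw [hlenB, show max 0 (kv.1 + 1) = 0 by omega, ← hLz]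

-- a key is in the dict iff some entry of the list carries it
theorem pv_mem_keys_ofList (l : List (Int × String)) (x : Int) :
    x ∈ (PySem.Dict.ofList l).keys ↔ x ∈ l.map Prod.fst := by
  have hk := PySem.Dict.keys_foldl_insert_key (ν := String) l Prod.fst (fun _ p => p.2)
    PySem.Dict.empty
  have hofl : PySem.Dict.ofList l =
      l.foldl (fun d (x : Int × String) => d.insert x.1 ((fun _ p => p.2) d x)) PySem.Dict.empty := rfl
  rw [hofl, hk, PySem.Dict.keys_empty]
  simp [PySem.Set.mem_update]

theorem pv_alt_eq (d : List (Int × String)) (h : Pre_get_namespace_list_py d) :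
    get_namespace_list_py d = get_namespace_list_py_alt d := by
  have hne : d ≠ [] := h
  unfold get_namespace_list_py get_namespace_list_py_alt
  have hnodup : ((PySem.Dict.ofList d).items.map Prod.fst).Nodup :=
    PySem.Dict.nodup_keys_ofList d
  cases hmx : PySem.List.max? (PySem.Dict.ofList d).keys (fun x => x) with
  | none =>
      exfalso
      have hnil : (PySem.Dict.ofList d).keys = [] := (PySem.List.max?_eq_none_iff _ _).mp hmx
      obtain ⟨kv, hkv⟩ := List.exists_mem_of_ne_nil d hne
      have : kv.1 ∈ (PySem.Dict.ofList d).keys :=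
        (pv_mem_keys_ofList d kv.1).mpr (List.mem_map_of_mem hkv)
      simp [hnil] at this
  | some mx =>
      -- facts about the sorted item list
      have hperm : (PySem.List.sorted (PySem.Dict.ofList d).items (fun item => item.1) false).Perm
          (PySem.Dict.ofList d).items := PySem.List.sorted_perm _ _ _
      set s := PySem.List.sorted (PySem.Dict.ofList d).items (fun item => item.1) false with hs
      have hsnodup : (s.map Prod.fst).Nodup := ((hperm.map Prod.fst).nodup_iff).mpr hnodup
      have hple : s.Pairwise (fun a b => a.1 ≤ b.1) := PySem.List.sorted_pairwise _ _
      have hpne : s.Pairwise (fun a b => a.1 ≠ b.1) := List.pairwise_map.mp hsnodup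
      have hpw : s.Pairwise (fun a b => a.1 < b.1) := by
        have := hple.and hpne
        exact this.imp (fun hab => lt_of_le_of_ne hab.1 hab.2)
      have hent : ∀ kv ∈ s, (PySem.Dict.ofList d).get? kv.1 = some kv.2 := by
        intro kv hkv
        have hm : kv ∈ (PySem.Dict.ofList d).items := hperm.subset hkv
        exact PySem.Dict.get?_of_mem_items _ (by simpa using hm) hnodup
      have hcomp : ∀ i : Int, 0 ≤ i → (PySem.Dict.ofList d).contains i →
          i ∈ s.map Prod.fst ∨ ∀ kv ∈ s, kv.1 < i := by
        intro i _ hc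
        left
        have : i ∈ (PySem.Dict.ofList d).keys := by
          rw [← PySem.Dict.contains_iff_mem_keys]; exact hc
        exact ((hperm.map Prod.fst).mem_iff).mpr (by simpa [PySem.Dict.keys] using this)
      rw [pv_build d s hpw hent hcomp]
      -- A side: the append loop is a map over the same range
      have hfun : (fun (acc : List String) (i : Int) =>
          if (PySem.Dict.ofList d).contains i = true then
            acc ++ [(PySem.Dict.ofList d).getD i "None"]
          else acc ++ ["None"]) =
          (fun acc i => acc ++ [if (PySem.Dict.ofList d).contains i = true then
            (PySem.Dict.ofList d).getD i "None" else "None"]) := by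
        funext acc i; split_ifs <;> rfl
      dsimp only
      rw [hfun, pv_foldl_app, List.nil_append]
      -- both ranges are the same: pvLenB s = mx + 1 (or both are empty)
      have hsne : s ≠ [] := by
        intro hnil
        have : (PySem.Dict.ofList d).items = [] := (PySem.List.sorted_eq_nil_iff _ _ _).mp hnil
        obtain ⟨kv, hkv⟩ := List.exists_mem_of_ne_nil d hne
        have hmem : kv.1 ∈ (PySem.Dict.ofList d).keys :=
          (pv_mem_keys_ofList d kv.1).mpr (List.mem_map_of_mem hkv)
        simp [PySem.Dict.keys, this] at hmem
      rcases s.eq_nil_or_concat with hnil | ⟨t, p, hcat⟩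
      · exact absurd hnil hsne
      · rw [List.concat_eq_append] at hcat
        have hlenB : pvLenB s = max 0 (p.1 + 1) := by
          rw [hcat]; simp only [pvLenB, List.getLast?_concat]
        have hpmem : p ∈ s := by rw [hcat]; simp
        have hple' : p.1 ≤ mx := by
          have hm : p ∈ (PySem.Dict.ofList d).items := hperm.subset hpmem
          have : p.1 ∈ (PySem.Dict.ofList d).keys := by
            simpa [PySem.Dict.keys] using List.mem_map_of_mem (f := Prod.fst) hm
          simpa using PySem.List.max?_isMax hmx p.1 this
        have hpge : mx ≤ p.1 := by
          have hm : mx ∈ (PySem.Dict.ofList d).keys := PySem.List.max?_mem hmx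
          have : mx ∈ s.map Prod.fst :=
            ((hperm.map Prod.fst).mem_iff).mpr (by simpa [PySem.Dict.keys] using hm)
          obtain ⟨x, hx, he⟩ := List.mem_map.mp this
          rw [hcat] at hx
          rcases List.mem_append.mp hx with hx' | hx'
          · have hall := (List.pairwise_append.mp (hcat ▸ hpw)).2.2
            have := hall x hx' p (by simp)
            omega
          · have : x = p := by simpa using hx'
            subst this; omega
        have hpmx : p.1 = mx := le_antisymm hple' hpge
        by_cases h0 : 0 ≤ mx
        · rw [hlenB, hpmx, show max 0 (mx + 1) = mx + 1 by omega]
        · rw [PySem.List.pyRange_one_eq_nil (by omega),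
            PySem.List.pyRange_one_eq_nil (show pvLenB s ≤ 0 by rw [hlenB]; omega)]

-- ===== VERDICT (by name: the statement is the Claim_ definition above) =====
theorem get_namespace_list_py_spec : Claim_equal_get_namespace_list_py := by
  intro d _ hpre
  unfold Spec_get_namespace_list_py
  exact pv_alt_eq d hpre
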